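-- pv_equiv track=rewrite | github.com/dh-trier/cldh-jobs | Ranking/concept_frequencies.py | concept_complete
-- ===== SOURCE A (Python) =====
-- def concept_complete(a, b):
--     """
--         Diese Methode wird verwendet, um festzustellen, ob und wie oft zwei Teilbegriffe eines Konzepts
--         im Text nahe beieinanderstehen, d.h. der Index der Wörter im Text sollte sich nur um +/-3 unterscheiden.
--     """
--     count = 0
--     indices = []
--     for x in a:
--         for y in b:
--             if abs(x - y) <= 3:     # berechnet den Betrag der beiden Werte
--                 count += 1
--                 indices.append(x)
--                 indices.append(y)
--                 del b[b.index(y)]   # der Indexwert y wird gelöscht, um diesen nicht erneut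
--                                     # zur Distanzberechnung zu verwenden
--                 break
--
--     return indices
-- ===== SOURCE B (Python) =====
-- def concept_complete(a, b):
--     # Index positions of b per value once; for each x pick, among values in
--     # [x-3, x+3], the unused b-occurrence with the smallest original position.
--     # Note: unlike the original, this does not mutate b in place.
--     pos = {}
--     for i, y in enumerate(b):
--         pos.setdefault(y, []).append(i)
--     head = {v: 0 for v in pos}
--     out = []
--     for x in a:
--         best_i = None
--         best_v = None
--         for v in range(x - 3, x + 4):
--             q = pos.get(v)
--             if q is not None and head[v] < len(q):
--                 if best_i is None or q[head[v]] < best_i: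
--                     best_i = q[head[v]]
--                     best_v = v
--         if best_i is not None:
--             out.append(x)
--             out.append(best_v)
--             head[best_v] += 1
--     return out
-- ===== Notes on version B (the rewrite author's own statement) =====
-- stated objective: faster
-- what changed: Replaces the nested rescan of b (with list.index/del) by a position index per value built in one pass over b plus a moving head pointer per value; for each x it examines only the 7 values in [x-3,x+3] and takes the earliest unused b-position.
import Mathlib
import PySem

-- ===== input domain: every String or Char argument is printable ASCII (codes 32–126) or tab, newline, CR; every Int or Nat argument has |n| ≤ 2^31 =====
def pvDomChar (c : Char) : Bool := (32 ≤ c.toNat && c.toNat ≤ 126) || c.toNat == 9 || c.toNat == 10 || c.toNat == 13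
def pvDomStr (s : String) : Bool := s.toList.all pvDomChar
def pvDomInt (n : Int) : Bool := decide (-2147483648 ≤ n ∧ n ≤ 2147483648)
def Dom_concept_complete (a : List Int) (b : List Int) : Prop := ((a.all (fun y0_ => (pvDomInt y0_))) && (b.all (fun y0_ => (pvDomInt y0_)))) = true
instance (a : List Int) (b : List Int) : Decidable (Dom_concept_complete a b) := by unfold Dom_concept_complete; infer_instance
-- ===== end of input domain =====

-- B replaces A's nested rescan of b by a per-value position index with moving head
-- pointers (objective: faster).  A mutates its argument b in place (deletes matched
-- elements); B does not — the equivalence proved here is about the RETURN value only.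

-- ===== PORT A =====
-- inner 'for y in b: if abs(x - y) <= 3: … break' — yields the first matching y
def ccFind (x : Int) : List Int → Option Int
  | [] => none
  | y :: ys => if |x - y| ≤ 3 then some y else ccFind x ys

-- one outer-loop iteration; state = (count, b, indices); 'del b[b.index(y)]' is
-- PySem.List.remove? (y always occurs in b here, so getD never takes its default)
def ccStep (st : Int × List Int × List Int) (x : Int) : Int × List Int × List Int :=
  match ccFind x st.2.1 with
  | none => st
  | some y => (st.1 + 1, (PySem.List.remove? st.2.1 y).getD st.2.1, st.2.2 ++ [x, y])

def concept_complete (a : List Int) (b : List Int) : List Int :=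
  (a.foldl ccStep (0, b, [])).2.2

-- ===== PORT B =====
-- pos: for i, y in enumerate(b): pos.setdefault(y, []).append(i)
def altPos (b : List Int) : PySem.Dict Int (List Int) :=
  (PySem.List.enumerate b).foldl (fun d p => d.modify p.2 [] (· ++ [p.1])) PySem.Dict.empty

-- head = {v: 0 for v in pos}
def altHead (pos : PySem.Dict Int (List Int)) : PySem.Dict Int Int :=
  pos.keys.foldl (fun d v => d.insert v 0) PySem.Dict.empty

-- body of 'for v in range(x - 3, x + 4)': update (best_i, best_v); head[v] is
-- head.getD v 0 (every key of pos is a key of head, so getD is exact here) and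
-- q[head[v]] is pyGetD (the guard puts the index in range, so pyGetD is exact)
def altStep0 (pos : PySem.Dict Int (List Int)) (head : PySem.Dict Int Int)
    (best : Option (Int × Int)) (v : Int) : Option (Int × Int) :=
  match pos.get? v with
  | none => best
  | some q =>
    if head.getD v 0 < (q.length : Int) then
      let i := PySem.List.pyGetD q (head.getD v 0) 0
      match best with
      | none => some (i, v)
      | some bi => if i < bi.1 then some (i, v) else best
    else best

-- one iteration of 'for x in a'; state = (head, out)
def altStepB (pos : PySem.Dict Int (List Int))
    (st : PySem.Dict Int Int × List Int) (x : Int) : PySem.Dict Int Int × List Int :=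
  match (PySem.List.pyRange (x - 3) (x + 4) 1).foldl (altStep0 pos st.1) none with
  | none => st
  | some iv => (st.1.modify iv.2 0 (· + 1), st.2 ++ [x, iv.2])

def concept_complete_alt (a : List Int) (b : List Int) : List Int :=
  (a.foldl (altStepB (altPos b)) (altHead (altPos b), [])).2

-- ===== PRECONDITION & SPEC =====
def Spec_concept_complete (a : List Int) (b : List Int) (out : List Int) : Prop := out = concept_complete_alt a b
instance (a : List Int) (b : List Int) (out : List Int) : Decidable (Spec_concept_complete a b out) := by unfold Spec_concept_complete; infer_instance

-- ===== CLAIM (what is proved, stated in full; the proofs are below) =====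
def Claim_equal_concept_complete : Prop := ∀ (a : List Int) (b : List Int), Dom_concept_complete a b → Spec_concept_complete a b (concept_complete a b)

-- ===== LEMMAS AND PROOFS =====

-- remaining (not yet consumed) queue of b-positions carrying value v in B's state
def remQ (pos : PySem.Dict Int (List Int)) (head : PySem.Dict Int Int) (v : Int) : List Int :=
  (pos.getD v []).drop (head.getD v 0).toNat

-- the coupling invariant: L is the list of (original position, value) pairs still
-- unmatched; A's current b is its values, B's queues are its positions per value
def InvAB (pos : PySem.Dict Int (List Int)) (bcur : List Int) (head : PySem.Dict Int Int) : Prop :=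
  ∃ L : List (Int × Int),
    L.Pairwise (fun p q => p.1 < q.1) ∧
    bcur = L.map (·.2) ∧
    (∀ v, 0 ≤ head.getD v 0 ∧
      remQ pos head v = (L.filter (fun p => p.2 == v)).map (·.1))

theorem ccFind_eq_find? (x : Int) (l : List Int) :
    ccFind x l = l.find? (fun y => |x - y| ≤ 3) := by
  induction l with
  | nil => rfl
  | cons y ys ih =>
    by_cases h : |x - y| ≤ 3 <;> simp [ccFind, List.find?, h, ih]

-- candidate position of value v, as B's inner loop reads it
def pickF (pos : PySem.Dict Int (List Int)) (head : PySem.Dict Int Int) (v : Int) : Option Int :=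
  match pos.get? v with
  | none => none
  | some q =>
    if head.getD v 0 < (q.length : Int) then some (PySem.List.pyGetD q (head.getD v 0) 0)
    else none

theorem altStep0_eq (pos : PySem.Dict Int (List Int)) (head : PySem.Dict Int Int)
    (best : Option (Int × Int)) (v : Int) :
    altStep0 pos head best v =
      match pickF pos head v with
      | none => best
      | some i =>
        match best with
        | none => some (i, v)
        | some bi => if i < bi.1 then some (i, v) else best := by
  unfold altStep0 pickF
  cases pos.get? v with
  | none => rfl
  | some q => by_cases h : head.getD v 0 < (q.length : Int) <;> simp [h]

theorem pickF_eq_head? (pos : PySem.Dict Int (List Int)) (head : PySem.Dict Int Int)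
    (v : Int) (hnn : 0 ≤ head.getD v 0) :
    pickF pos head v = (remQ pos head v).head? := by
  unfold pickF remQ
  cases hq : pos.get? v with
  | none => rw [PySem.Dict.getD_of_get?_eq_none pos [] hq]; simp
  | some q =>
    rw [PySem.Dict.getD_of_get?_eq_some pos [] hq]
    by_cases h : head.getD v 0 < (q.length : Int)
    · have hlt : (head.getD v 0).toNat < q.length := by omega
      simp [h, List.head?_drop, PySem.List.pyGetD_of_nonneg q 0 hnn,
        List.getElem?_eq_getElem hlt]
    · have hge : q.length ≤ (head.getD v 0).toNat := by omega
      simp [h, List.drop_eq_nil_of_le hge]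

theorem foldl_pick_none (pos : PySem.Dict Int (List Int)) (head : PySem.Dict Int Int)
    (vs : List Int) (acc : Option (Int × Int))
    (h : ∀ v ∈ vs, pickF pos head v = none) :
    vs.foldl (altStep0 pos head) acc = acc := by
  induction vs generalizing acc with
  | nil => rfl
  | cons v vs ih =>
    rw [List.foldl_cons]
    have hstep : altStep0 pos head acc v = acc := by
      rw [altStep0_eq, h v (List.mem_cons_self ..)]
    rw [hstep]
    exact ih acc (fun w hw => h w (List.mem_cons_of_mem _ hw))

theorem foldl_pick_stable (pos : PySem.Dict Int (List Int)) (head : PySem.Dict Int Int)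
    (vs : List Int) (i₀ v₀ : Int)
    (h : ∀ v ∈ vs, ∀ i, pickF pos head v = some i → i₀ ≤ i) :
    vs.foldl (altStep0 pos head) (some (i₀, v₀)) = some (i₀, v₀) := by
  induction vs with
  | nil => rfl
  | cons v vs ih =>
    rw [List.foldl_cons]
    have hstep : altStep0 pos head (some (i₀, v₀)) v = some (i₀, v₀) := by
      rw [altStep0_eq]
      cases hf : pickF pos head v with
      | none => rfl
      | some i =>
        have hle := h v (List.mem_cons_self ..) i hf
        simp only []
        rw [if_neg (by omega)]
    rw [hstep]
    exact ih (fun w hw i hf => h w (List.mem_cons_of_mem _ hw) i hf)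

theorem foldl_pick_min (pos : PySem.Dict Int (List Int)) (head : PySem.Dict Int Int)
    (vs : List Int) (i₀ v₀ : Int)
    (hmem : v₀ ∈ vs) (hf : pickF pos head v₀ = some i₀)
    (hmin : ∀ v ∈ vs, ∀ i, pickF pos head v = some i → i₀ ≤ i)
    (huniq : ∀ v ∈ vs, pickF pos head v = some i₀ → v = v₀)
    (acc : Option (Int × Int))
    (hacc : acc = none ∨ ∃ j w, acc = some (j, w) ∧ i₀ < j) :
    vs.foldl (altStep0 pos head) acc = some (i₀, v₀) := by
  induction vs generalizing acc with
  | nil => cases hmem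
  | cons v vs ih =>
    rw [List.foldl_cons, altStep0_eq]
    cases hfv : pickF pos head v with
    | none =>
      have hv₀ : v₀ ∈ vs := by
        rcases List.mem_cons.mp hmem with rfl | hm
        · rw [hf] at hfv; cases hfv
        · exact hm
      exact ih hv₀ (fun w hw i h' => hmin w (List.mem_cons_of_mem _ hw) i h')
        (fun w hw h' => huniq w (List.mem_cons_of_mem _ hw) h') acc hacc
    | some i =>
      by_cases hvv : v = v₀
      · subst hvv
        have hii : i = i₀ := by rw [hf] at hfv; injection hfv with h'; exact h'.symm
        subst hii
        have hstab := foldl_pick_stable pos head vs i v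
          (fun w hw i' hf' => hmin w (List.mem_cons_of_mem _ hw) i' hf')
        rcases hacc with rfl | ⟨j, w, rfl, hj⟩
        · exact hstab
        · show List.foldl (altStep0 pos head) (if i < j then some (i, v) else some (j, w)) vs
            = some (i, v)
          rw [if_pos (by omega)]
          exact hstab
      · have hne : i ≠ i₀ := fun e => hvv (huniq v (List.mem_cons_self ..) (e ▸ hfv))
        have hge : i₀ ≤ i := hmin v (List.mem_cons_self ..) i hfv
        have hv₀ : v₀ ∈ vs := by
          rcases List.mem_cons.mp hmem with rfl | hm
          · exact absurd rfl hvv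
          · exact hm
        have hrec := fun acc' hacc' => ih hv₀
          (fun w hw i' h' => hmin w (List.mem_cons_of_mem _ hw) i' h')
          (fun w hw h' => huniq w (List.mem_cons_of_mem _ hw) h') acc' hacc'
        rcases hacc with rfl | ⟨j, w, rfl, hj⟩
        · exact hrec (some (i, v)) (Or.inr ⟨i, v, rfl, by omega⟩)
        · show List.foldl (altStep0 pos head) (if i < j then some (i, v) else some (j, w)) vs
            = some (i₀, v₀)
          by_cases hij : i < j
          · rw [if_pos hij]; exact hrec (some (i, v)) (Or.inr ⟨i, v, rfl, by omega⟩)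
          · rw [if_neg hij]; exact hrec (some (j, w)) (Or.inr ⟨j, w, rfl, hj⟩)

theorem altPos_getD (b : List Int) (v : Int) :
    (altPos b).getD v [] =
      ((PySem.List.enumerate b).filter (fun p => p.2 == v)).map (·.1) := by
  unfold altPos
  have : (PySem.List.enumerate b).foldl (fun d p => d.modify p.2 [] (· ++ [p.1])) PySem.Dict.empty
      = ((PySem.List.enumerate b).map (fun p => (p.2, p.1))).foldl
          (fun d p => d.modify p.1 [] (· ++ [p.2])) PySem.Dict.empty := by
    rw [List.foldl_map]
  rw [this, PySem.Dict.getD_foldl_modify_append]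
  simp [List.filter_map, Function.comp_def]

theorem altHead_getD (pos : PySem.Dict Int (List Int)) (v : Int) :
    (altHead pos).getD v 0 = 0 := by
  unfold altHead
  have h : ∀ (ks : List Int) (d : PySem.Dict Int Int), (∀ w, d.getD w 0 = 0) →
      (ks.foldl (fun d v => d.insert v 0) d).getD v 0 = 0 := by
    intro ks
    induction ks with
    | nil => intro d hd; exact hd v
    | cons k ks ih =>
      intro d hd
      refine ih _ (fun w => ?_)
      by_cases hw : w = k
      · subst hw; exact PySem.Dict.getD_insert_self d w 0 0
      · rw [PySem.Dict.getD_insert_of_ne d 0 0 hw]; exact hd w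
  refine h pos.keys PySem.Dict.empty (fun w => ?_)
  rfl

theorem filter_eraseP_of_ne {α : Type} (p q : α → Bool) (l : List α)
    (h : ∀ x, q x = true → p x = false) :
    (l.eraseP q).filter p = l.filter p := by
  induction l with
  | nil => rfl
  | cons x l ih =>
    by_cases hq : q x = true
    · rw [List.eraseP_cons_of_pos hq, List.filter_cons, if_neg (by simp [h x hq])]
    · rw [List.eraseP_cons_of_neg hq, List.filter_cons, List.filter_cons, ih]

theorem filter_eraseP_self {α : Type} (p : α → Bool) (l : List α) :
    (l.eraseP p).filter p = (l.filter p).tail := by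
  induction l with
  | nil => rfl
  | cons x l ih =>
    by_cases hp : p x = true
    · rw [List.eraseP_cons_of_pos hp, List.filter_cons, if_pos (by simp [hp]), List.tail_cons]
    · rw [List.eraseP_cons_of_neg hp, List.filter_cons, List.filter_cons, if_neg (by simp [hp]),
        if_neg (by simp [hp]), ih]

theorem main_aux (pos : PySem.Dict Int (List Int)) (a : List Int) :
    ∀ (c : Int) (bcur out : List Int) (head : PySem.Dict Int Int),
    InvAB pos bcur head →
    (a.foldl ccStep (c, bcur, out)).2.2 = (a.foldl (altStepB pos) (head, out)).2 := by
  induction a with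
  | nil => intro c bcur out head _; rfl
  | cons x a ih =>
    intro c bcur out head hInv
    obtain ⟨L, hPW, hb, hrem⟩ := hInv
    rw [List.foldl_cons, List.foldl_cons]
    have hfindb : ccFind x bcur =
        (L.find? (fun p => |x - p.2| ≤ 3)).map (·.2) := by
      rw [ccFind_eq_find?, hb, List.find?_map]; rfl
    cases hfind : L.find? (fun p => |x - p.2| ≤ 3) with
    | none =>
      -- no pair in distance ≤ 3: both sides keep their state
      have hA : ccStep (c, bcur, out) x = (c, bcur, out) := by
        unfold ccStep; rw [hfindb, hfind]; rfl
      have hnone : ∀ v ∈ PySem.List.pyRange (x - 3) (x + 4) 1, pickF pos head v = none := by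
        intro v hv
        obtain ⟨hv1, hv2⟩ := PySem.List.mem_pyRange_one.mp hv
        rw [pickF_eq_head? pos head v (hrem v).1, (hrem v).2]
        have hfil : L.filter (fun p => p.2 == v) = [] := by
          rw [List.filter_eq_nil_iff]
          intro q hq hqv
          have hq2 : q.2 = v := by simpa using hqv
          have := List.find?_eq_none.mp hfind q hq
          rw [hq2] at this
          simp [abs_le] at this
          omega
        rw [hfil]; rfl
      have hB : altStepB pos (head, out) x = (head, out) := by
        unfold altStepB
        rw [foldl_pick_none pos head _ none hnone]
      rw [hA, hB]
      exact ih c bcur out head ⟨L, hPW, hb, hrem⟩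
    | some p =>
      obtain ⟨hP, l₁, l₂, hL, hl₁⟩ := List.find?_eq_some_iff_append.mp hfind
      have hy : |x - p.2| ≤ 3 := by simpa using hP
      have hl₂ : ∀ q ∈ l₂, p.1 < q.1 := by
        have := (List.pairwise_append.mp (hL ▸ hPW)).2.1
        exact fun q hq => (List.pairwise_cons.mp this).1 q hq
      have hkey : ∀ q ∈ L, |x - q.2| ≤ 3 → q = p ∨ p.1 < q.1 := by
        intro q hq hq3
        rw [hL] at hq
        rcases List.mem_append.mp hq with h1 | h2
        · exact absurd (by simpa using hq3) (by simpa using hl₁ q h1)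
        · rcases List.mem_cons.mp h2 with rfl | h2
          · exact Or.inl rfl
          · exact Or.inr (hl₂ q h2)
      have hfily : L.filter (fun q => q.2 == p.2) = p :: l₂.filter (fun q => q.2 == p.2) := by
        rw [hL, List.filter_append]
        have h1 : l₁.filter (fun q => q.2 == p.2) = [] := by
          rw [List.filter_eq_nil_iff]
          intro q hq hqv
          have hq2 : q.2 = p.2 := by simpa using hqv
          have := hl₁ q hq
          rw [hq2] at this
          simp at this
          exact absurd this (not_lt_of_ge hy)
        rw [h1, List.filter_cons, if_pos (by simp)]
        rfl
      -- what each pickF answer means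
      have hpick_mem : ∀ v i, pickF pos head v = some i →
          ∃ q ∈ L, q.2 = v ∧ q.1 = i := by
        intro v i hpi
        rw [pickF_eq_head? pos head v (hrem v).1, (hrem v).2] at hpi
        cases hfl : L.filter (fun q => q.2 == v) with
        | nil => rw [hfl] at hpi; cases hpi
        | cons q t =>
          rw [hfl] at hpi
          have hqm : q ∈ L.filter (fun q => q.2 == v) := by rw [hfl]; exact List.mem_cons_self ..
          refine ⟨q, List.mem_of_mem_filter hqm, by simpa using List.of_mem_filter hqm, ?_⟩
          simpa using hpi
      have hymem : p.2 ∈ PySem.List.pyRange (x - 3) (x + 4) 1 := by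
        rw [PySem.List.mem_pyRange_one]
        rw [abs_le] at hy; omega
      have hfy : pickF pos head p.2 = some p.1 := by
        rw [pickF_eq_head? pos head p.2 (hrem p.2).1, (hrem p.2).2, hfily]
        rfl
      have hmin : ∀ v ∈ PySem.List.pyRange (x - 3) (x + 4) 1, ∀ i,
          pickF pos head v = some i → p.1 ≤ i := by
        intro v hv i hpi
        obtain ⟨hv1, hv2⟩ := PySem.List.mem_pyRange_one.mp hv
        obtain ⟨q, hqL, hqv, hqi⟩ := hpick_mem v i hpi
        have hq3 : |x - q.2| ≤ 3 := by rw [hqv, abs_le]; omega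
        rcases hkey q hqL hq3 with rfl | hlt
        · omega
        · omega
      have huniq : ∀ v ∈ PySem.List.pyRange (x - 3) (x + 4) 1,
          pickF pos head v = some p.1 → v = p.2 := by
        intro v hv hpi
        obtain ⟨hv1, hv2⟩ := PySem.List.mem_pyRange_one.mp hv
        obtain ⟨q, hqL, hqv, hqi⟩ := hpick_mem v p.1 hpi
        have hq3 : |x - q.2| ≤ 3 := by rw [hqv, abs_le]; omega
        rcases hkey q hqL hq3 with rfl | hlt
        · exact hqv.symm
        · omega
      -- A's step
      have hymemb : p.2 ∈ bcur := by
        rw [hb]; exact List.mem_map_of_mem (hL ▸ (List.mem_append.mpr (Or.inr (List.mem_cons_self ..))))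
      have hA : ccStep (c, bcur, out) x = (c + 1, bcur.erase p.2, out ++ [x, p.2]) := by
        unfold ccStep
        rw [hfindb, hfind]
        simp only [Option.map_some]
        rw [PySem.List.remove?_eq_some_erase bcur p.2 hymemb]
        rfl
      -- B's step
      have hB : altStepB pos (head, out) x =
          (head.modify p.2 0 (· + 1), out ++ [x, p.2]) := by
        unfold altStepB
        rw [foldl_pick_min pos head _ p.1 p.2 hymem hfy hmin huniq none (Or.inl rfl)]
      rw [hA, hB]
      -- new invariant witness
      refine ih (c + 1) _ _ _ ⟨L.eraseP (fun q => q.2 == p.2), ?_, ?_, ?_⟩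
      · exact List.Pairwise.sublist List.eraseP_sublist hPW
      · rw [hb, List.erase_eq_eraseP', List.eraseP_map]
        rfl
      · intro v
        by_cases hv : v = p.2
        · subst hv
          constructor
          · rw [PySem.Dict.getD_modify_self]
            have := (hrem p.2).1
            omega
          · unfold remQ
            rw [PySem.Dict.getD_modify_self]
            have hnn := (hrem p.2).1
            have htn : (head.getD p.2 0 + 1).toNat = (head.getD p.2 0).toNat + 1 := by omega
            rw [htn, ← List.tail_drop]
            have := (hrem p.2).2
            unfold remQ at this
            rw [this, hfily, filter_eraseP_self, hfily]
            rfl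
        · constructor
          · rw [PySem.Dict.getD_modify_of_ne head 0 _ hv]
            exact (hrem v).1
          · unfold remQ
            rw [PySem.Dict.getD_modify_of_ne head 0 _ hv]
            have := (hrem v).2
            unfold remQ at this
            rw [this, filter_eraseP_of_ne]
            intro q hq
            have : q.2 = p.2 := by simpa using hq
            simp [this]
            exact fun e => hv e.symm

theorem InvAB_init (b : List Int) : InvAB (altPos b) b (altHead (altPos b)) := by
  refine ⟨PySem.List.enumerate b, PySem.List.pairwise_lt_enumerate b 0,
    (PySem.List.map_snd_enumerate b 0).symm, fun v => ⟨by rw [altHead_getD], ?_⟩⟩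
  unfold remQ
  rw [altHead_getD, altPos_getD]
  rfl

-- ===== VERDICT (by name: the statement is the Claim_ definition above) =====
theorem concept_complete_spec : Claim_equal_concept_complete := by
  intro a b _
  unfold Spec_concept_complete concept_complete concept_complete_alt
  exact main_aux (altPos b) a 0 b [] (altHead (altPos b)) (InvAB_init b)
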